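-- pv_equiv track=rewrite | github.com/Smartappli/AIMER | AIMER-ROOT/website/views.py | _build_project_rag_index
-- ===== SOURCE A (Python) =====
-- def _build_project_rag_index(
--     projects: dict[str, tuple[str, ...]],
--     articles: list[str],
-- ) -> dict[str, list[str]]:
--     """
--     Build a mapping of project names to related scientific article filenames.
--
--     Args:
--         projects: Project keyword map.
--         articles: Available article filenames.
--
--     Returns:
--         Project-indexed list of matched article filenames.
--
--     """
--     index: dict[str, list[str]] = {}
--     normalized_articles = [(name, name.lower()) for name in articles]
--     for project_name, keywords in projects.items():
--         matches = [
--             name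
--             for name, lowered in normalized_articles
--             if any(keyword in lowered for keyword in keywords)
--         ]
--         index[project_name] = matches
--     return index
-- ===== SOURCE B (Python) =====
-- def _build_project_rag_index(
--     projects: dict[str, tuple[str, ...]],
--     articles: list[str],
-- ) -> dict[str, list[str]]:
--     """Inverted-index variant: build a keyword -> projects map once, then scan
--     each article a single time over the distinct keywords, appending the
--     article to every project one of whose keywords matched."""
--     index: dict[str, list[str]] = {name: [] for name in projects}
--     kw_to_projects: dict[str, list[str]] = {}
--     for name, keywords in projects.items():
--         for kw in keywords:
--             kw_to_projects.setdefault(kw, []).append(name)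
--     for article in articles:
--         lowered = article.lower()
--         seen = set()
--         for kw, names in kw_to_projects.items():
--             if kw in lowered:
--                 for name in names:
--                     if name not in seen:
--                         seen.add(name)
--                         index[name].append(article)
--     return index
-- ===== Notes on version B (the rewrite author's own statement) =====
-- stated objective: faster
-- what changed: A scans all articles once per project, re-testing every keyword of every project against every article; B inverts the loop structure: it builds a keyword->projects map once, then scans each article a single time over the distinct keywords only, appending the article to every matched project's list (a seen-set prevents double appends).
import Mathlib
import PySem

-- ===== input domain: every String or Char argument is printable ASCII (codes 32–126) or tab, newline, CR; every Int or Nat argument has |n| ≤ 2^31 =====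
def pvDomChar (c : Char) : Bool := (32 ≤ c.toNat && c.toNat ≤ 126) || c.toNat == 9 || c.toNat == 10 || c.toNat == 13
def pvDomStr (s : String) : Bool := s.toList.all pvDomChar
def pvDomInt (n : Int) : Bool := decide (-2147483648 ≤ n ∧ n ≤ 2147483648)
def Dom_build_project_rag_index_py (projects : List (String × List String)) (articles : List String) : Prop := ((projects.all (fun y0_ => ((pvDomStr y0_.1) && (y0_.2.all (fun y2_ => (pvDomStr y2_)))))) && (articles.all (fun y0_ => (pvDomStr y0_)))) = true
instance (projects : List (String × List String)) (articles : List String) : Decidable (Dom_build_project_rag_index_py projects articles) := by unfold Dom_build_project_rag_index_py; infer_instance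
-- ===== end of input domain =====

-- B builds an inverted keyword→projects map once and scans each article a single time over the
-- distinct keywords, instead of A's per-project pass over all articles; the returned index is
-- proved identical (both ports model the dict parameter: duplicate keys collapse, last value wins).

-- ===== PORT A =====
-- literal transliteration of _build_project_rag_index: per project, a comprehension over the
-- normalized articles keeps those where any keyword is a substring; index[name] = matches.
def build_project_rag_index_py (projects : List (String × List String)) (articles : List String) : List (String × List String) :=
  let normalized := articles.map (fun name => (name, PySem.Str.lower name))
  let index : PySem.Dict String (List String) :=
    projects.foldl (fun index p =>
      index.insert p.1
        ((normalized.filter (fun nl => p.2.any (fun kw => PySem.Str.isIn kw nl.2))).map (fun nl => nl.1)))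
      PySem.Dict.empty
  index.items

-- ===== PORT B =====
-- literal transliteration of Source B; pd models the Python dict argument (the parameter is a dict).
def build_project_rag_index_py_alt (projects : List (String × List String)) (articles : List String) : List (String × List String) :=
  let pd : PySem.Dict String (List String) := PySem.Dict.ofList projects
  let index : PySem.Dict String (List String) :=
    pd.keys.foldl (fun d name => d.insert name []) PySem.Dict.empty
  let kwToProjects : PySem.Dict String (List String) :=
    pd.items.foldl (fun m p =>
      p.2.foldl (fun m kw => m.modify kw [] (fun v => v ++ [p.1])) m) PySem.Dict.empty
  let final := articles.foldl (fun idx article =>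
    let lowered := PySem.Str.lower article
    (kwToProjects.items.foldl (fun st kn =>
        if PySem.Str.isIn kn.1 lowered then
          kn.2.foldl (fun st name =>
            if st.2.contains name then st
            else (st.1.modify name [] (fun v => v ++ [article]), PySem.Set.add st.2 name)) st
        else st)
      (idx, (PySem.Set.empty : PySem.Set String))).1) index
  final.items

-- ===== PRECONDITION & SPEC =====
def Spec_build_project_rag_index_py (projects : List (String × List String)) (articles : List String) (out : List (String × List String)) : Prop := out = build_project_rag_index_py_alt projects articles
instance (projects : List (String × List String)) (articles : List String) (out : List (String × List String)) : Decidable (Spec_build_project_rag_index_py projects articles out) := by unfold Spec_build_project_rag_index_py; infer_instance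

-- ===== CLAIM (what is proved, stated in full; the proofs are below) =====
def Claim_equal_build_project_rag_index_py : Prop := ∀ (projects : List (String × List String)) (articles : List String), Dom_build_project_rag_index_py projects articles → Spec_build_project_rag_index_py projects articles (build_project_rag_index_py projects articles)

-- ===== LEMMAS AND PROOFS =====

-- A's per-project fold stored F(keywords); its lookups are pd's lookups mapped through F.
lemma pv_get?_foldl_insertF (F : List String → List String) :
    ∀ (l : List (String × List String)) (d e : PySem.Dict String (List String)),
    (∀ k, e.get? k = (d.get? k).map F) →
    ∀ k, (l.foldl (fun e p => e.insert p.1 (F p.2)) e).get? k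
        = ((l.foldl (fun d p => d.insert p.1 p.2) d).get? k).map F := by
  intro l
  induction l with
  | nil => intro d e h k; exact h k
  | cons p t ih =>
      intro d e h k
      simp only [List.foldl_cons]
      refine ih _ _ (fun k' => ?_) k
      rw [PySem.Dict.get?_insert, PySem.Dict.get?_insert]
      by_cases hk : k' = p.1 <;> simp [hk, h k']

-- membership in the inverted map after inserting one project's keywords
lemma pv_kwmap_inner (name0 : String) :
    ∀ (ks : List String) (m : PySem.Dict String (List String)) (kw name : String),
    name ∈ (ks.foldl (fun m k => m.modify k [] (fun v => v ++ [name0])) m).getD kw []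
      ↔ name ∈ m.getD kw [] ∨ (name = name0 ∧ kw ∈ ks) := by
  intro ks
  induction ks with
  | nil => simp
  | cons k0 t ih =>
      intro m kw name
      simp only [List.foldl_cons]
      rw [ih]
      rw [PySem.Dict.getD_modify]
      by_cases hk : kw = k0 <;> simp [hk] <;> tauto

-- membership in the full inverted keyword→projects map
lemma pv_kwmap_mem :
    ∀ (L : List (String × List String)) (m : PySem.Dict String (List String)) (kw name : String),
    name ∈ (L.foldl (fun m p => p.2.foldl (fun m k => m.modify k [] (fun v => v ++ [p.1])) m) m).getD kw []
      ↔ name ∈ m.getD kw [] ∨ ∃ p ∈ L, p.1 = name ∧ kw ∈ p.2 := by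
  intro L
  induction L with
  | nil => simp
  | cons p t ih =>
      intro m kw name
      simp only [List.foldl_cons]
      rw [ih, pv_kwmap_inner]
      simp only [List.mem_cons]
      constructor
      · rintro (⟨h | h⟩ | h)
        · exact Or.inl h
        · exact Or.inr ⟨p, Or.inl rfl, h.1.symm ▸ rfl, h.2⟩
        · obtain ⟨q, hq, h1, h2⟩ := h; exact Or.inr ⟨q, Or.inr hq, h1, h2⟩
      · rintro (h | ⟨q, hq | hq, h1, h2⟩)
        · exact Or.inl (Or.inl h)
        · subst hq; exact Or.inl (Or.inr ⟨h1.symm, h2⟩)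
        · exact Or.inr ⟨q, hq, h1, h2⟩

lemma pv_kwmap_nodup :
    ∀ (L : List (String × List String)) (m : PySem.Dict String (List String)),
    m.keys.Nodup →
    (L.foldl (fun m p => p.2.foldl (fun m k => m.modify k [] (fun v => v ++ [p.1])) m) m).keys.Nodup := by
  intro L
  induction L with
  | nil => intro m h; exact h
  | cons p t ih =>
      intro m h
      simp only [List.foldl_cons]
      exact ih _ (PySem.Dict.nodup_keys_foldl_modify_key p.2 (fun k => k) [] (fun _ _ v => v ++ [p.1]) m h)


lemma pv_names_fold (article : String) :
    ∀ (ns : List String) (d : PySem.Dict String (List String)) (s : PySem.Set String),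
    (∀ name, (ns.foldl (fun st name => if st.2.contains name then st
        else (st.1.modify name [] (fun v => v ++ [article]), PySem.Set.add st.2 name)) (d, s)).1.getD name []
      = if name ∈ ns ∧ name ∉ s then d.getD name [] ++ [article] else d.getD name [])
    ∧ (∀ name, name ∈ (ns.foldl (fun st name => if st.2.contains name then st
        else (st.1.modify name [] (fun v => v ++ [article]), PySem.Set.add st.2 name)) (d, s)).2
      ↔ name ∈ s ∨ name ∈ ns)
    ∧ ((∀ n ∈ ns, n ∈ d.keys) →
        (ns.foldl (fun st name => if st.2.contains name then st
        else (st.1.modify name [] (fun v => v ++ [article]), PySem.Set.add st.2 name)) (d, s)).1.keys = d.keys) := by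
  intro ns
  induction ns with
  | nil => intro d s; refine ⟨by simp, by simp, by intro _; rfl⟩
  | cons n0 t ih =>
      intro d s
      simp only [List.foldl_cons]
      by_cases hc : PySem.Set.contains s n0 = true
      · have hn0s : n0 ∈ s := (PySem.Set.contains_iff s n0).mp hc
        rw [if_pos hc]
        obtain ⟨ihg, ihm, ihk⟩ := ih d s
        refine ⟨?_, ?_, ?_⟩
        · intro name
          rw [ihg name]
          by_cases h3 : name = n0
          · subst h3; simp [hn0s, List.mem_cons]
          · simp [h3, List.mem_cons]
        · intro name
          rw [ihm name]; simp only [List.mem_cons]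
          constructor
          · rintro (h | h)
            · exact Or.inl h
            · exact Or.inr (Or.inr h)
          · rintro (h | rfl | h)
            · exact Or.inl h
            · exact Or.inl hn0s
            · exact Or.inr h
        · intro h; exact ihk (fun n hn => h n (List.mem_cons_of_mem _ hn))
      · have hn0s : n0 ∉ s := fun h => hc ((PySem.Set.contains_iff s n0).mpr h)
        rw [if_neg hc]
        obtain ⟨ihg, ihm, ihk⟩ := ih (d.modify n0 [] (fun v => v ++ [article])) (PySem.Set.add s n0)
        refine ⟨?_, ?_, ?_⟩
        · intro name
          rw [ihg name, PySem.Dict.getD_modify]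
          by_cases h3 : name = n0
          · subst h3; simp [hn0s, List.mem_cons]
          · simp [PySem.Set.mem_add, h3, List.mem_cons]
        · intro name
          rw [ihm name, PySem.Set.mem_add]; simp only [List.mem_cons]; tauto
        · intro h
          have hk : n0 ∈ d.keys := h n0 (by simp)
          have hkeys : (PySem.Dict.modify d n0 [] (fun v => v ++ [article])).keys = d.keys := by
            rw [PySem.Dict.keys_modify]
            exact PySem.Dict.keys_insert_of_contains d _ ((PySem.Dict.contains_iff_mem_keys d n0).mpr hk)
          rw [ihk (fun n hn => hkeys ▸ h n (List.mem_cons_of_mem _ hn)), hkeys]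

set_option maxHeartbeats 1000000 in
lemma pv_items_fold (article : String) (lowered : String) :
    ∀ (L : List (String × List String)) (d : PySem.Dict String (List String)) (s : PySem.Set String),
    (∀ name, (L.foldl (fun st kn =>
        if PySem.Str.isIn kn.1 lowered then
          kn.2.foldl (fun st name => if st.2.contains name then st
            else (st.1.modify name [] (fun v => v ++ [article]), PySem.Set.add st.2 name)) st
        else st) (d, s)).1.getD name []
      = if (∃ kn ∈ L, PySem.Str.isIn kn.1 lowered = true ∧ name ∈ kn.2) ∧ name ∉ s
          then d.getD name [] ++ [article] else d.getD name [])
    ∧ (∀ name, name ∈ (L.foldl (fun st kn =>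
        if PySem.Str.isIn kn.1 lowered then
          kn.2.foldl (fun st name => if st.2.contains name then st
            else (st.1.modify name [] (fun v => v ++ [article]), PySem.Set.add st.2 name)) st
        else st) (d, s)).2
      ↔ name ∈ s ∨ ∃ kn ∈ L, PySem.Str.isIn kn.1 lowered = true ∧ name ∈ kn.2)
    ∧ ((∀ kn ∈ L, ∀ n ∈ kn.2, n ∈ d.keys) →
        (L.foldl (fun st kn =>
        if PySem.Str.isIn kn.1 lowered then
          kn.2.foldl (fun st name => if st.2.contains name then st
            else (st.1.modify name [] (fun v => v ++ [article]), PySem.Set.add st.2 name)) st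
        else st) (d, s)).1.keys = d.keys) := by
  intro L
  induction L with
  | nil => intro d s; refine ⟨by simp, by simp, by intro _; rfl⟩
  | cons kn0 t ih =>
      intro d s
      simp only [List.foldl_cons]
      by_cases hin : PySem.Str.isIn kn0.1 lowered = true
      · rw [if_pos hin]
        obtain ⟨ng, nm, nk⟩ := pv_names_fold article kn0.2 d s
        obtain ⟨ihg, ihm, ihk⟩ := ih (kn0.2.foldl (fun st name => if st.2.contains name then st
            else (st.1.modify name [] (fun v => v ++ [article]), PySem.Set.add st.2 name)) (d, s)).1
          (kn0.2.foldl (fun st name => if st.2.contains name then st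
            else (st.1.modify name [] (fun v => v ++ [article]), PySem.Set.add st.2 name)) (d, s)).2
        simp only [Prod.mk.eta] at ihg ihm ihk
        refine ⟨?_, ?_, ?_⟩
        · intro name
          rw [ihg name]
          simp only [nm name, ng name, List.exists_mem_cons_iff]
          clear ihg ihm ihk nm ng nk ih
          by_cases hS : name ∈ s <;> by_cases hP : name ∈ kn0.2 <;>
            by_cases hT : ∃ kn ∈ t, PySem.Str.isIn kn.1 lowered = true ∧ name ∈ kn.2 <;>
            simp only [hS, hP, hT, hin, not_false_eq_true, not_true_eq_false,
              and_true, and_false, or_false, or_true, and_self, if_true, if_false]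
        · intro name
          rw [ihm name, nm name]
          constructor
          · rintro ((h | h) | h)
            · exact Or.inl h
            · exact Or.inr ⟨kn0, List.mem_cons_self, hin, h⟩
            · obtain ⟨kn, hkn, h1, h2⟩ := h; exact Or.inr ⟨kn, List.mem_cons_of_mem _ hkn, h1, h2⟩
          · rintro (h | ⟨kn, hkn, h1, h2⟩)
            · exact Or.inl (Or.inl h)
            · rcases List.mem_cons.mp hkn with rfl | hkn'
              · exact Or.inl (Or.inr h2)
              · exact Or.inr ⟨kn, hkn', h1, h2⟩
        · intro h
          have hk0 : (kn0.2.foldl (fun st name => if st.2.contains name then st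
              else (st.1.modify name [] (fun v => v ++ [article]), PySem.Set.add st.2 name)) (d, s)).1.keys = d.keys :=
            nk (fun n hn => h kn0 List.mem_cons_self n hn)
          rw [ihk (fun kn hkn n hn => by rw [hk0]; exact h kn (List.mem_cons_of_mem _ hkn) n hn), hk0]
      · rw [if_neg hin]
        obtain ⟨ihg, ihm, ihk⟩ := ih d s
        refine ⟨?_, ?_, ?_⟩
        · intro name
          rw [ihg name]
          congr 1
          simp only [List.mem_cons, eq_iff_iff]
          constructor
          · rintro ⟨⟨kn, hkn, h1, h2⟩, h4⟩; exact ⟨⟨kn, Or.inr hkn, h1, h2⟩, h4⟩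
          · rintro ⟨⟨kn, hkn | hkn, h1, h2⟩, h4⟩
            · exact absurd (hkn ▸ h1) hin
            · exact ⟨⟨kn, hkn, h1, h2⟩, h4⟩
        · intro name
          rw [ihm name]
          constructor
          · rintro (h | ⟨kn, hkn, h1, h2⟩)
            · exact Or.inl h
            · exact Or.inr ⟨kn, List.mem_cons_of_mem _ hkn, h1, h2⟩
          · rintro (h | ⟨kn, hkn, h1, h2⟩)
            · exact Or.inl h
            · rcases List.mem_cons.mp hkn with rfl | hkn'
              · exact absurd h1 hin
              · exact Or.inr ⟨kn, hkn', h1, h2⟩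
        · intro h; exact ihk (fun kn hkn n hn => h kn (List.mem_cons_of_mem _ hkn) n hn)

lemma pv_articles_fold (K : List (String × List String)) :
    ∀ (arts : List String) (d : PySem.Dict String (List String)),
    (∀ kn ∈ K, ∀ n ∈ kn.2, n ∈ d.keys) →
    (∀ name, (arts.foldl (fun idx article =>
        (K.foldl (fun st kn =>
          if PySem.Str.isIn kn.1 (PySem.Str.lower article) then
            kn.2.foldl (fun st name => if st.2.contains name then st
              else (st.1.modify name [] (fun v => v ++ [article]), PySem.Set.add st.2 name)) st
          else st) (idx, (PySem.Set.empty : PySem.Set String))).1) d).getD name []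
      = d.getD name [] ++ arts.filter (fun a => K.any (fun kn => PySem.Str.isIn kn.1 (PySem.Str.lower a) && kn.2.contains name)))
    ∧ (arts.foldl (fun idx article =>
        (K.foldl (fun st kn =>
          if PySem.Str.isIn kn.1 (PySem.Str.lower article) then
            kn.2.foldl (fun st name => if st.2.contains name then st
              else (st.1.modify name [] (fun v => v ++ [article]), PySem.Set.add st.2 name)) st
          else st) (idx, (PySem.Set.empty : PySem.Set String))).1) d).keys = d.keys := by
  intro arts
  induction arts with
  | nil => intro d h; exact ⟨fun name => by simp, rfl⟩
  | cons a t ih =>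
      intro d h
      simp only [List.foldl_cons]
      obtain ⟨ig, im, ik⟩ := pv_items_fold a (PySem.Str.lower a) K d PySem.Set.empty
      have hkeys : (K.foldl (fun st kn =>
          if PySem.Str.isIn kn.1 (PySem.Str.lower a) then
            kn.2.foldl (fun st name => if st.2.contains name then st
              else (st.1.modify name [] (fun v => v ++ [a]), PySem.Set.add st.2 name)) st
          else st) (d, (PySem.Set.empty : PySem.Set String))).1.keys = d.keys := ik h
      obtain ⟨iht, ihk⟩ := ih _ (fun kn hkn n hn => by rw [hkeys]; exact h kn hkn n hn)
      refine ⟨fun name => ?_, by rw [ihk, hkeys]⟩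
      rw [iht name, ig name]
      have hcond : (K.any (fun kn => PySem.Str.isIn kn.1 (PySem.Str.lower a) && kn.2.contains name)) = true
          ↔ ∃ kn ∈ K, PySem.Str.isIn kn.1 (PySem.Str.lower a) = true ∧ name ∈ kn.2 := by
        simp only [List.any_eq_true, Bool.and_eq_true, List.contains_iff_mem]
      rw [List.filter_cons]
      have hempty : name ∉ (PySem.Set.empty : PySem.Set String) := by
        simp [PySem.Set.empty]
      by_cases hx : ∃ kn ∈ K, PySem.Str.isIn kn.1 (PySem.Str.lower a) = true ∧ name ∈ kn.2
      · rw [if_pos (⟨hx, hempty⟩ : (∃ kn ∈ K, PySem.Str.isIn kn.1 (PySem.Str.lower a) = true ∧ name ∈ kn.2) ∧ name ∉ (PySem.Set.empty : PySem.Set String)), if_pos (hcond.mpr hx)]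
        simp [List.append_assoc]
      · rw [if_neg (fun hh => hx (And.left hh)), if_neg (fun hh => hx (hcond.mp hh))]

-- the two ports return the same index on every input
lemma pv_main : ∀ (projects : List (String × List String)) (articles : List String),
    build_project_rag_index_py projects articles = build_project_rag_index_py_alt projects articles := by
  intro projects articles
  -- names for the recurring terms (all definitional)
  let F : List String → List String := fun kws =>
    ((articles.map (fun name => (name, PySem.Str.lower name))).filter
      (fun nl => kws.any (fun kw => PySem.Str.isIn kw nl.2))).map (fun nl => nl.1)
  let pd : PySem.Dict String (List String) := PySem.Dict.ofList projects
  let A : PySem.Dict String (List String) :=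
    projects.foldl (fun e p => e.insert p.1 (F p.2)) PySem.Dict.empty
  let index0 : PySem.Dict String (List String) :=
    pd.keys.foldl (fun d name => d.insert name []) PySem.Dict.empty
  let kwmap : PySem.Dict String (List String) :=
    pd.items.foldl (fun m p =>
      p.2.foldl (fun m kw => m.modify kw [] (fun v => v ++ [p.1])) m) PySem.Dict.empty
  let final : PySem.Dict String (List String) :=
    articles.foldl (fun idx article =>
      (kwmap.items.foldl (fun st kn =>
          if PySem.Str.isIn kn.1 (PySem.Str.lower article) then
            kn.2.foldl (fun st name =>
              if st.2.contains name then st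
              else (st.1.modify name [] (fun v => v ++ [article]), PySem.Set.add st.2 name)) st
          else st)
        (idx, (PySem.Set.empty : PySem.Set String))).1) index0
  have hFfilter : ∀ kws, F kws = articles.filter (fun a => kws.any (fun kw => PySem.Str.isIn kw (PySem.Str.lower a))) := by
    intro kws
    show ((articles.map (fun name => (name, PySem.Str.lower name))).filter
      (fun nl => kws.any (fun kw => PySem.Str.isIn kw nl.2))).map (fun nl => nl.1) = _
    rw [List.filter_map, List.map_map]
    simp [Function.comp_def, pysem]
  have pdnodup : pd.keys.Nodup := by
    show (projects.foldl (fun d p => d.insert p.1 p.2) PySem.Dict.empty).keys.Nodup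
    exact PySem.Dict.nodup_keys_foldl_insert_key projects (fun p => p.1) (fun _ p => p.2) _ (by simp)
  have hAget : ∀ k, A.get? k = (pd.get? k).map F := by
    intro k
    show (projects.foldl (fun e p => e.insert p.1 (F p.2)) PySem.Dict.empty).get? k
        = ((projects.foldl (fun d p => d.insert p.1 p.2) PySem.Dict.empty).get? k).map F
    exact pv_get?_foldl_insertF F projects _ _ (fun k => rfl) k
  have hAkeys : A.keys = pd.keys := by
    show (projects.foldl (fun e p => e.insert p.1 (F p.2)) PySem.Dict.empty).keys
        = (projects.foldl (fun d p => d.insert p.1 p.2) PySem.Dict.empty).keys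
    rw [PySem.Dict.keys_foldl_insert_key projects (fun p => p.1) (fun _ p => F p.2),
        PySem.Dict.keys_foldl_insert_key projects (fun p => p.1) (fun _ p => p.2)]
  have hAnodup : A.keys.Nodup := hAkeys ▸ pdnodup
  have hI0get : ∀ k, index0.getD k [] = [] := by
    have haux : ∀ (l : List String) (d : PySem.Dict String (List String)) k,
        d.getD k [] = [] → (l.foldl (fun d name => d.insert name []) d).getD k [] = [] := by
      intro l
      induction l with
      | nil => intro d k h; exact h
      | cons x t ih =>
          intro d k h
          simp only [List.foldl_cons]
          refine ih _ _ ?_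
          rw [PySem.Dict.getD_insert]
          split_ifs <;> simp [h]
    intro k
    exact haux pd.keys PySem.Dict.empty k rfl
  have hI0keys : index0.keys = pd.keys := by
    show (pd.keys.foldl (fun d name => d.insert name []) PySem.Dict.empty).keys = pd.keys
    rw [PySem.Dict.keys_foldl_insert_key pd.keys (fun name => name) (fun _ _ => [])]
    simp only [List.map_id']
    calc PySem.Set.update PySem.Dict.empty.keys pd.keys
        = PySem.Set.ofList pd.keys := rfl
      _ = pd.keys := PySem.Set.ofList_eq_self_of_nodup _ pdnodup
  have kwnodup : kwmap.keys.Nodup := pv_kwmap_nodup pd.items PySem.Dict.empty (by simp)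
  have hkwmem : ∀ kw name, name ∈ kwmap.getD kw [] ↔ ∃ p ∈ pd.items, p.1 = name ∧ kw ∈ p.2 := by
    intro kw name
    show name ∈ (pd.items.foldl (fun m p =>
      p.2.foldl (fun m kw => m.modify kw [] (fun v => v ++ [p.1])) m) PySem.Dict.empty).getD kw [] ↔ _
    rw [pv_kwmap_mem]
    simp
  have hkwkeys : ∀ kn ∈ kwmap.items, ∀ n ∈ kn.2, n ∈ index0.keys := by
    intro kn hkn n hn
    have hget : kwmap.get? kn.1 = some kn.2 :=
      PySem.Dict.get?_of_mem_items kwmap (by exact (Prod.mk.eta (p := kn)) ▸ hkn) kwnodup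
    have hmem : n ∈ kwmap.getD kn.1 [] := by
      rw [PySem.Dict.getD_eq_get?_getD, hget]; exact hn
    rw [hkwmem] at hmem
    obtain ⟨p, hp, hp1, _⟩ := hmem
    rw [hI0keys]
    exact hp1 ▸ List.mem_map_of_mem hp
  obtain ⟨hBget, hBkeys⟩ := pv_articles_fold kwmap.items articles index0 hkwkeys
  have hFkeys : final.keys = pd.keys := by rw [hBkeys, hI0keys]
  have hFnodup : final.keys.Nodup := hFkeys ▸ pdnodup
  have hpdget : ∀ k, k ∈ pd.keys → pd.get? k = some (pd.getD k []) := by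
    intro k hk
    cases hg : pd.get? k with
    | none => exact absurd hk ((PySem.Dict.get?_eq_none_iff_not_mem_keys pd k).mp hg)
    | some v => rw [PySem.Dict.getD_eq_get?_getD, hg]; rfl
  have hcond : ∀ k, k ∈ pd.keys → ∀ a,
      (kwmap.items.any (fun kn => PySem.Str.isIn kn.1 (PySem.Str.lower a) && kn.2.contains k))
      = ((pd.getD k []).any (fun kw => PySem.Str.isIn kw (PySem.Str.lower a))) := by
    intro k hk a
    rw [Bool.eq_iff_iff]
    simp only [List.any_eq_true, Bool.and_eq_true, List.contains_iff_mem]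
    constructor
    · rintro ⟨kn, hkn, h1, h2⟩
      have hget : kwmap.get? kn.1 = some kn.2 :=
        PySem.Dict.get?_of_mem_items kwmap (by exact (Prod.mk.eta (p := kn)) ▸ hkn) kwnodup
      have hmem : k ∈ kwmap.getD kn.1 [] := by
        rw [PySem.Dict.getD_eq_get?_getD, hget]; exact h2
      rw [hkwmem] at hmem
      obtain ⟨p, hp, hp1, hp2⟩ := hmem
      have hgp : pd.get? p.1 = some p.2 :=
        PySem.Dict.get?_of_mem_items pd (by exact (Prod.mk.eta (p := p)) ▸ hp) pdnodup
      rw [hp1, hpdget k hk] at hgp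
      have hv : pd.getD k [] = p.2 := Option.some_inj.mp hgp
      refine ⟨kn.1, ?_, h1⟩
      rw [hv]; exact hp2
    · rintro ⟨kw, hkw, h1⟩
      have hmem : k ∈ kwmap.getD kw [] := by
        rw [hkwmem]
        exact ⟨(k, pd.getD k []), PySem.Dict.mem_items_of_get?_eq_some pd (hpdget k hk), rfl, hkw⟩
      cases hg : kwmap.get? kw with
      | none =>
          rw [PySem.Dict.getD_eq_get?_getD, hg] at hmem
          exact absurd hmem (by simp)
      | some v =>
          refine ⟨(kw, v), PySem.Dict.mem_items_of_get?_eq_some kwmap hg, h1, ?_⟩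
          rw [PySem.Dict.getD_eq_get?_getD, hg] at hmem
          exact hmem
  show A.items = final.items
  rw [PySem.Dict.items_eq_map_keys A hAnodup [],
      PySem.Dict.items_eq_map_keys final hFnodup [],
      hAkeys, hFkeys]
  refine List.map_congr_left ?_
  intro k hk
  have hAgetD : A.getD k [] = F (pd.getD k []) := by
    rw [PySem.Dict.getD_eq_get?_getD, hAget k, hpdget k hk]; rfl
  have hBgetD : final.getD k [] =
      articles.filter (fun a => kwmap.items.any (fun kn => PySem.Str.isIn kn.1 (PySem.Str.lower a) && kn.2.contains k)) := by
    rw [hBget k, hI0get k]; rfl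
  rw [hAgetD, hBgetD, hFfilter]
  refine congrArg _ (List.filter_congr ?_)
  intro a _
  exact (hcond k hk a).symm

-- ===== VERDICT (by name: the statement is the Claim_ definition above) =====
theorem build_project_rag_index_py_spec : Claim_equal_build_project_rag_index_py := by
  intro projects articles _dom
  unfold Spec_build_project_rag_index_py
  exact pv_main projects articles
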